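-- pv_equiv track=rewrite | github.com/mayelespino/code | COMMON/DataStructures/binary-tree-python/isValidBinaryTree.py | isValidBinaryTree
-- ===== SOURCE A (Python) =====
-- def isValidBinaryTree(numberOfNodes):
-- 	if numberOfNodes in [0,2] : return False
-- 	if numberOfNodes in [1,3] : return True
-- 	while numberOfNodes > 3:
-- 		if numberOfNodes % 2 == 0: break
-- 		numberOfNodes = int((numberOfNodes - 1 )/2)
--
-- 	if numberOfNodes == 3:
-- 		return True
-- 	else:
-- 		return False
-- ===== SOURCE B (Python) =====
-- def isValidBinaryTree(numberOfNodes):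
--     # A full binary-tree shape exists exactly for node counts 2**k - 1 (k >= 1):
--     # grow powers of two upward and compare once, instead of halving down with parity checks.
--     if numberOfNodes <= 0:
--         return False
--     target = numberOfNodes + 1
--     m = 2
--     while m < target:
--         m *= 2
--     return m == target
-- ===== Notes on version B (the rewrite author's own statement) =====
-- stated objective: simpler
-- what changed: Replaces the parity-checking downward halving loop with its small-count special cases by a single upward doubling loop that finds the least power of two at least n+1 and compares it with n+1, since valid counts are exactly the predecessors of powers of two.
import Mathlib
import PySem

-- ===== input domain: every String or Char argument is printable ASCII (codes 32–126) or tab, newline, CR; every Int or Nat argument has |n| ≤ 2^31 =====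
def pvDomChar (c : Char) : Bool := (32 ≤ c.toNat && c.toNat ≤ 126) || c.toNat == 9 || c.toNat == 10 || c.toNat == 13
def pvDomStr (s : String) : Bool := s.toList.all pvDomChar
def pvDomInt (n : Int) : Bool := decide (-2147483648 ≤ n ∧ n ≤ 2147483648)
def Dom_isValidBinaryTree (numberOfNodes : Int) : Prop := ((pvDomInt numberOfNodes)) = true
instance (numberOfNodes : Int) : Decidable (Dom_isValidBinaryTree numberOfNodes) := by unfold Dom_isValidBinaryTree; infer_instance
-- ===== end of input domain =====

-- B replaces A's parity-checking downward halving loop (and its small-count special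
-- cases) by one upward doubling loop comparing the least power of two ≥ n+1 with n+1.


-- ===== PORT A =====
-- A's while loop: while n > 3: if n % 2 == 0: break; n = int((n-1)/2).
-- `int((n-1)/2)` is exact floor division here (n odd, n > 3, so n-1 is even and
-- positive and the float quotient is exact within the domain): PySem.Int.floordiv.
def isValidBinaryTreeLoop (n : Int) : Int :=
  if n > 3 then
    if PySem.Int.mod n 2 = 0 then n
    else isValidBinaryTreeLoop (PySem.Int.floordiv (n - 1) 2)
  else n
termination_by n.toNat
decreasing_by
  have h2 : PySem.Int.floordiv (n - 1) 2 = (n - 1) / 2 :=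
    PySem.Int.floordiv_eq_ediv_of_pos (by omega)
  rw [h2]; omega

def isValidBinaryTree (numberOfNodes : Int) : Bool :=
  if numberOfNodes = 0 ∨ numberOfNodes = 2 then false
  else if numberOfNodes = 1 ∨ numberOfNodes = 3 then true
  else if isValidBinaryTreeLoop numberOfNodes = 3 then true
  else false

-- ===== PORT B =====
-- while m < target: m *= 2   (the `0 < m` conjunct only makes the recursion total;
-- B only calls it with m = 2)
def isValidBinaryTreeGrow (m target : Int) : Int :=
  if h : 0 < m ∧ m < target then isValidBinaryTreeGrow (2 * m) target else m
termination_by (target - m).toNat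
decreasing_by omega

def isValidBinaryTree_alt (numberOfNodes : Int) : Bool :=
  if numberOfNodes ≤ 0 then false
  else decide (isValidBinaryTreeGrow 2 (numberOfNodes + 1) = numberOfNodes + 1)

-- ===== PRECONDITION & SPEC =====
def Spec_isValidBinaryTree (numberOfNodes : Int) (out : Bool) : Prop := out = isValidBinaryTree_alt numberOfNodes
instance (numberOfNodes : Int) (out : Bool) : Decidable (Spec_isValidBinaryTree numberOfNodes out) := by unfold Spec_isValidBinaryTree; infer_instance

-- ===== CLAIM (what is proved, stated in full; the proofs are below) =====
def Claim_equal_isValidBinaryTree : Prop := ∀ (numberOfNodes : Int), Dom_isValidBinaryTree numberOfNodes → Spec_isValidBinaryTree numberOfNodes (isValidBinaryTree numberOfNodes)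

-- ===== LEMMAS AND PROOFS =====

-- A's loop reaches 3 exactly on n = 2^k - 1 with k ≥ 2.
theorem loopA_eq_three_iff (n : Int) :
    isValidBinaryTreeLoop n = 3 ↔ ∃ k : Nat, 2 ≤ k ∧ n + 1 = 2 ^ k := by
  by_cases hn : n > 3
  · by_cases he : PySem.Int.mod n 2 = 0
    · have hmod : n % 2 = 0 := by
        rwa [PySem.Int.mod_eq_emod_of_pos (by norm_num : (0:Int) < 2)] at he
      rw [isValidBinaryTreeLoop, if_pos hn, if_pos he]
      constructor
      · intro h3; omega
      · rintro ⟨k, hk2, hk⟩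
        -- n + 1 = 2^k with k ≥ 2 is even, so n is odd: contradicts n % 2 = 0
        have hdvd : (2 : Int) ∣ 2 ^ k := dvd_pow_self 2 (by omega)
        omega
    · have hmod : n % 2 = 1 := by
        have h := PySem.Int.mod_eq_emod_of_pos (a := n) (by norm_num : (0:Int) < 2)
        omega
      have hfd : PySem.Int.floordiv (n - 1) 2 = (n - 1) / 2 :=
        PySem.Int.floordiv_eq_ediv_of_pos (by norm_num)
      rw [isValidBinaryTreeLoop, if_pos hn, if_neg he, hfd]
      have ih := loopA_eq_three_iff ((n - 1) / 2)
      rw [ih]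
      constructor
      · rintro ⟨k, hk2, hk⟩
        refine ⟨k + 1, by omega, ?_⟩
        have h2 : n + 1 = 2 * ((n - 1) / 2 + 1) := by omega
        rw [h2, show (n - 1) / 2 + 1 = 2 ^ k by omega, pow_succ]; ring
      · rintro ⟨k, hk2, hk⟩
        rcases k with _ | j
        · omega
        · rw [pow_succ] at hk
          have hp1 : (1:Int) ≤ 2 ^ j := one_le_pow₀ (by norm_num)
          have hhalf : (n - 1) / 2 + 1 = 2 ^ j := by omega
          refine ⟨j, ?_, hhalf⟩
          -- n > 3 gives 2^j * 2 = n + 1 > 4, so j ≥ 2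
          by_contra hcon
          interval_cases j <;> omega
  · rw [isValidBinaryTreeLoop, if_neg hn]
    constructor
    · intro h3; exact ⟨2, le_refl 2, by omega⟩
    · rintro ⟨k, hk2, hk⟩
      have hge : (2:Int) ^ 2 ≤ 2 ^ k := pow_le_pow_right₀ (by norm_num) hk2
      norm_num at hge; omega
termination_by n.toNat
decreasing_by omega

-- B's doubling loop returns target exactly when target = m * 2^i for some i.
theorem grow_eq_iff (m target : Int) (hm : 0 < m) :
    isValidBinaryTreeGrow m target = target ↔ m ≤ target ∧ ∃ i : Nat, target = m * 2 ^ i := by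
  by_cases hlt : m < target
  · rw [isValidBinaryTreeGrow, dif_pos ⟨hm, hlt⟩]
    rw [grow_eq_iff (2 * m) target (by omega)]
    constructor
    · rintro ⟨h2m, i, hi⟩
      exact ⟨by omega, i + 1, by rw [hi, pow_succ]; ring⟩
    · rintro ⟨_, i, hi⟩
      rcases i with _ | j
      · norm_num at hi; omega
      · refine ⟨?_, j, by rw [hi, pow_succ]; ring⟩
        have hp1 : (1:Int) ≤ 2 ^ j := one_le_pow₀ (by norm_num)
        have hs : m * 2 ^ (j + 1) = 2 * m * 2 ^ j := by rw [pow_succ]; ring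
        nlinarith
  · rw [isValidBinaryTreeGrow, dif_neg (by omega)]
    constructor
    · intro h; exact ⟨le_of_eq h, 0, by omega⟩
    · rintro ⟨hle, _⟩; omega
termination_by (target - m).toNat
decreasing_by omega

-- A returns true exactly on n = 2^k - 1 with k ≥ 1.
theorem portA_iff (n : Int) :
    isValidBinaryTree n = true ↔ ∃ k : Nat, 1 ≤ k ∧ n + 1 = 2 ^ k := by
  unfold isValidBinaryTree
  by_cases h02 : n = 0 ∨ n = 2
  · rw [if_pos h02]
    simp only [Bool.false_eq_true, false_iff]
    rintro ⟨k, hk1, hk⟩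
    rcases k with _ | _ | j
    · omega
    · norm_num at hk; omega
    · have hp1 : (1:Int) ≤ 2 ^ j := one_le_pow₀ (by norm_num)
      rw [pow_succ, pow_succ] at hk; omega
  · rw [if_neg h02]
    by_cases h13 : n = 1 ∨ n = 3
    · rw [if_pos h13]
      simp only [true_iff]
      rcases h13 with h | h <;> subst h
      · exact ⟨1, le_refl 1, by norm_num⟩
      · exact ⟨2, by omega, by norm_num⟩
    · rw [if_neg h13]
      split_ifs with hl
      · simp only [true_iff]
        obtain ⟨k, hk2, hk⟩ := (loopA_eq_three_iff n).mp hl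
        exact ⟨k, by omega, hk⟩
      · simp only [false_iff]
        rintro ⟨k, hk1, hk⟩
        apply hl
        rw [loopA_eq_three_iff]
        refine ⟨k, ?_, hk⟩
        rcases k with _ | _ | j
        · omega
        · norm_num at hk; omega
        · omega

-- B returns true exactly on n = 2^k - 1 with k ≥ 1.
theorem portB_iff (n : Int) :
    isValidBinaryTree_alt n = true ↔ ∃ k : Nat, 1 ≤ k ∧ n + 1 = 2 ^ k := by
  unfold isValidBinaryTree_alt
  by_cases hneg : n ≤ 0
  · rw [if_pos hneg]
    simp only [Bool.false_eq_true, false_iff]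
    rintro ⟨k, hk1, hk⟩
    have hge : (2:Int) ^ 1 ≤ 2 ^ k := pow_le_pow_right₀ (by norm_num) hk1
    norm_num at hge; omega
  · rw [if_neg hneg, decide_eq_true_eq]
    rw [grow_eq_iff 2 (n + 1) (by norm_num)]
    constructor
    · rintro ⟨_, i, hi⟩
      exact ⟨i + 1, by omega, by rw [hi, pow_succ]; ring⟩
    · rintro ⟨k, hk1, hk⟩
      rcases k with _ | j
      · omega
      · rw [pow_succ] at hk
        exact ⟨by omega, j, by rw [hk]; ring⟩

-- ===== VERDICT (by name: the statement is the Claim_ definition above) =====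
theorem isValidBinaryTree_spec : Claim_equal_isValidBinaryTree := by
  intro n _
  unfold Spec_isValidBinaryTree
  rw [Bool.eq_iff_iff, portA_iff, portB_iff]
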